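-- pv_equiv track=rewrite | github.com/Jerryguan777/rolemesh | src/agent_runner/approval/policy.py | select_strictest_policy
-- ===== SOURCE A (Python) =====
-- from typing import Any
--
-- def select_strictest_policy(matched: list[dict[str, Any]]) -> dict[str, Any]:
--     """Pick the strictest policy among multiple matches for a batch request.
--
--     Strictness ranking:
--       1. Highest priority.
--       2. Shortest non-null auto_expire_minutes (tighter deadline = stricter).
--       3. First policy in list order (stable tiebreaker).
--
--     The caller must pass a non-empty list; an empty list is a programmer
--     error at this level, since "no match" is represented by the caller
--     not calling into this function at all.
--     """
--     if not matched:
--         raise ValueError("select_strictest_policy requires a non-empty list")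
--
--     def _key(p: dict[str, Any]) -> tuple[int, int]:
--         priority = p.get("priority")
--         if not isinstance(priority, int):
--             priority = 0
--         expire = p.get("auto_expire_minutes")
--         # Absent or non-positive expiry = no deadline; treat as least strict.
--         expire_rank = expire if isinstance(expire, int) and expire > 0 else 10**9
--         return (-priority, expire_rank)
--
--     best_key = _key(matched[0])
--     best = matched[0]
--     for p in matched[1:]:
--         k = _key(p)
--         if k < best_key:
--             best_key = k
--             best = p
--     return best
-- ===== SOURCE B (Python) =====
-- def select_strictest_policy(matched: list[dict[str, "Any"]]) -> dict[str, "Any"]: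
--     """Sort-then-take-front: stable sort by the strictness key and return the head."""
--     if not matched:
--         raise ValueError("select_strictest_policy requires a non-empty list")
--
--     def _key(p):
--         priority = p.get("priority")
--         if not isinstance(priority, int):
--             priority = 0
--         expire = p.get("auto_expire_minutes")
--         expire_rank = expire if isinstance(expire, int) and expire > 0 else 10**9
--         return (-priority, expire_rank)
--
--     return sorted(matched, key=_key)[0]
-- ===== Notes on version B (the rewrite author's own statement) =====
-- stated objective: simpler
-- what changed: Replaces the manual best/best_key tracking loop with a stable sort by the same strictness key followed by taking the first element; stability preserves the first-of-ties rule of A's strict '<' scan.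
import Mathlib
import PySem

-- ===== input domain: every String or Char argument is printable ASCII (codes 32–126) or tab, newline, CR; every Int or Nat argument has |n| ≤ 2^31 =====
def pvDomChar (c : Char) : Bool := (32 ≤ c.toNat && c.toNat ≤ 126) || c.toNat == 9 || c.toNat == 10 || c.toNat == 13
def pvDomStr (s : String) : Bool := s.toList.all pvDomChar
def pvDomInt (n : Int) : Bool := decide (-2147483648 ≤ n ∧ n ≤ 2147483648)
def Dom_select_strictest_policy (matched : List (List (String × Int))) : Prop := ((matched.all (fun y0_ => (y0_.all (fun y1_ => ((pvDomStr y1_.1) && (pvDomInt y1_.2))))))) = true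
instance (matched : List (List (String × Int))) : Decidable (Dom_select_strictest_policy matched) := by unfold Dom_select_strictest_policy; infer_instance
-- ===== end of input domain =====

-- B replaces A's manual best/best_key min-scan by a stable sort on the same key followed
-- by taking the first element (objective: simpler; not faster).


-- ===== PORT A =====
-- the shared `_key` helper: (-priority, expire_rank); dict values are Int, so the
-- isinstance(priority, int) test only distinguishes present vs absent keys
def pvKey (p : List (String × Int)) : Int × Int :=
  let priority : Int := (PySem.Dict.get? (PySem.Dict.mk p) "priority").getD 0
  let expire_rank : Int :=
    match PySem.Dict.get? (PySem.Dict.mk p) "auto_expire_minutes" with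
    | some e => if 0 < e then e else 1000000000
    | none => 1000000000
  (-priority, expire_rank)

-- Python's `<` on a pair of int 2-tuples (lexicographic)
def pvTupLt (a b : Int × Int) : Bool := a.1 < b.1 || (a.1 == b.1 && a.2 < b.2)

def select_strictest_policy (matched : List (List (String × Int))) : List (String × Int) :=
  match matched with
  | [] => []  -- Python raises ValueError here; excluded by Pre_
  | m0 :: rest =>
    (rest.foldl
      (fun (st : (Int × Int) × List (String × Int)) p =>
        let k := pvKey p
        if pvTupLt k st.1 then (k, p) else st)
      (pvKey m0, m0)).2

-- ===== PORT B =====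
def select_strictest_policy_alt (matched : List (List (String × Int))) : List (String × Int) :=
  match matched with
  | [] => []  -- Python raises ValueError here; excluded by Pre_
  | _ :: _ =>
    PySem.List.pyGetD
      (PySem.List.sorted2 matched (fun p => (pvKey p).1) (fun p => (pvKey p).2)) 0 []

-- ===== PRECONDITION & SPEC =====
-- Pre_ excludes exactly the empty list, on which A (and B) raise ValueError.
def Pre_select_strictest_policy (matched : List (List (String × Int))) : Prop := matched ≠ []
instance (matched : List (List (String × Int))) : Decidable (Pre_select_strictest_policy matched) := by unfold Pre_select_strictest_policy; infer_instance
def pvWitness_select_strictest_policy : (List (List (String × Int))) := [[("priority", 1), ("auto_expire_minutes", 5)]]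

def Spec_select_strictest_policy (matched : List (List (String × Int))) (out : List (String × Int)) : Prop := out = select_strictest_policy_alt matched
instance (matched : List (List (String × Int))) (out : List (String × Int)) : Decidable (Spec_select_strictest_policy matched out) := by unfold Spec_select_strictest_policy; infer_instance

-- ===== CLAIM (what is proved, stated in full; the proofs are below) =====
def Claim_equal_select_strictest_policy : Prop := ∀ (matched : List (List (String × Int))), Dom_select_strictest_policy matched → Pre_select_strictest_policy matched → Spec_select_strictest_policy matched (select_strictest_policy matched)

-- ===== LEMMAS AND PROOFS =====

-- the comparison sorted2 uses is exactly Python's tuple `<` on our keys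
lemma pvBefore_eq (x y : List (String × Int)) :
    (decide ((pvKey x).1 < (pvKey y).1) ||
      (!decide ((pvKey y).1 < (pvKey x).1) && decide ((pvKey x).2 < (pvKey y).2)))
    = pvTupLt (pvKey x) (pvKey y) := by
  simp only [pvTupLt]
  by_cases h1 : (pvKey x).1 < (pvKey y).1 <;> by_cases h2 : (pvKey y).1 < (pvKey x).1 <;>
    by_cases h3 : (pvKey x).1 = (pvKey y).1 <;> simp_all <;> omega

-- head of insertBy
lemma head?_insertBy {α : Type} (before : α → α → Bool) (x : α) (acc : List α) :
    (PySem.List.insertBy before x acc).head? =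
      some (match acc.head? with
            | none => x
            | some h => if before x h then x else h) := by
  cases acc with
  | nil => rfl
  | cons y ys => simp [PySem.List.insertBy]; split <;> simp

-- head of the insertion-sort fold is the strict-min fold
lemma head?_foldl_insertBy {α : Type} (before : α → α → Bool) :
    ∀ (xs : List α) (acc : List α) (h : α), acc.head? = some h →
      (xs.foldl (fun acc x => PySem.List.insertBy before x acc) acc).head? =
        some (xs.foldl (fun m x => if before x m then x else m) h) := by
  intro xs
  induction xs with
  | nil => intro acc h hh; simpa using hh
  | cons x rest ih =>
    intro acc h hh
    simp only [List.foldl_cons]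
    apply ih
    rw [head?_insertBy, hh]

-- A's fold keeps the invariant st = (pvKey best, best)
lemma foldA_eq (rest : List (List (String × Int))) :
    ∀ b, (rest.foldl
        (fun (st : (Int × Int) × List (String × Int)) p =>
          let k := pvKey p
          if pvTupLt k st.1 then (k, p) else st)
        (pvKey b, b))
      = (pvKey (rest.foldl (fun m p => if pvTupLt (pvKey p) (pvKey m) then p else m) b),
         rest.foldl (fun m p => if pvTupLt (pvKey p) (pvKey m) then p else m) b) := by
  induction rest with
  | nil => intro b; rfl
  | cons p t ih =>
    intro b
    simp only [List.foldl_cons]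
    by_cases h : pvTupLt (pvKey p) (pvKey b) = true <;> simp [h, ih]

-- ===== VERDICT (by name: the statement is the Claim_ definition above) =====
theorem select_strictest_policy_spec : Claim_equal_select_strictest_policy := by
  intro matched _hdom hpre
  unfold Spec_select_strictest_policy
  cases matched with
  | nil => exact absurd rfl hpre
  | cons m0 rest =>
    simp only [select_strictest_policy, select_strictest_policy_alt]
    rw [foldA_eq]
    have hhead :
        (PySem.List.sorted2 (m0 :: rest) (fun p => (pvKey p).1) (fun p => (pvKey p).2)).head? =
          some (rest.foldl (fun m p => if pvTupLt (pvKey p) (pvKey m) then p else m) m0) := by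
      unfold PySem.List.sorted2
      simp only [List.foldl_cons, if_neg Bool.false_ne_true]
      have h0 : (PySem.List.insertBy
          (fun a b => decide ((pvKey a).1 < (pvKey b).1) ||
            (!decide ((pvKey b).1 < (pvKey a).1) && decide ((pvKey a).2 < (pvKey b).2)))
          m0 []).head? = some m0 := rfl
      rw [head?_foldl_insertBy _ rest _ m0 h0]
      congr 2
      funext m p
      rw [pvBefore_eq]
    rw [PySem.List.pyGetD_zero, List.getD_eq_getElem?_getD, ← List.head?_eq_getElem?, hhead]
    rfl
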